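-- pv_equiv track=rewrite | github.com/ewhacote/ewhaCote_gmkim | week8/0817_131127_gmkim.py | solution
-- ===== SOURCE A (Python) =====
-- from collections import Counter
--
-- def solution(want, number, discount):
--     check = len(discount) - 9
--     days, start, end = 0, 0, 10
--
--     for _ in range(check):
--         days += 1
--         counter = Counter(discount[start:end])
--
--         for item, count in zip(want, number):
--             if counter[item] != count:
--                 days -= 1
--                 break
--
--         start += 1
--         end += 1
--
--     return days
-- ===== SOURCE B (Python) =====
-- def solution(want, number, discount):
--     # Sliding window: build the count dict for the first 10-day window once,
--     # then update it incrementally (one element leaves, one enters) per day.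
--     if len(discount) < 10:
--         return 0
--     pairs = list(zip(want, number))
--     cnt = {}
--     for x in discount[:10]:
--         cnt[x] = cnt.get(x, 0) + 1
--     days = 1 if all(cnt.get(it, 0) == c for it, c in pairs) else 0
--     for out, inc in zip(discount, discount[10:]):
--         cnt[out] = cnt.get(out, 0) - 1
--         cnt[inc] = cnt.get(inc, 0) + 1
--         if all(cnt.get(it, 0) == c for it, c in pairs):
--             days += 1
--     return days
-- ===== Notes on version B (the rewrite author's own statement) =====
-- stated objective: faster
-- what changed: Instead of rebuilding a Counter of the 10-element slice for every window, B builds the count dict once and slides it (decrement the leaving element, increment the entering one), checking the wants against the maintained dict.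
import Mathlib
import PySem

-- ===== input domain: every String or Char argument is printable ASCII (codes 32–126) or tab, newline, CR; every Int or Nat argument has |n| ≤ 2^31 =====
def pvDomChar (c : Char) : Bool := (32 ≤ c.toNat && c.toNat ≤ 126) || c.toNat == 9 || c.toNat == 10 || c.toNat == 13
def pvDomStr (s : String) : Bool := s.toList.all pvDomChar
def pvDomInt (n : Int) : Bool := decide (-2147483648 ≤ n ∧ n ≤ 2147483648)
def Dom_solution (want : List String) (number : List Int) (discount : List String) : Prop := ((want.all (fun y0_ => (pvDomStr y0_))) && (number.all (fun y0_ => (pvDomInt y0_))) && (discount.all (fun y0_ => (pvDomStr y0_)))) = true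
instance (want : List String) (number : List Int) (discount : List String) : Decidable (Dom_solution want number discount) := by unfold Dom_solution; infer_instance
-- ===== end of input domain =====

-- B replaces A's per-window Counter rebuild by one sliding count dict updated incrementally per day.

-- ===== PORT A =====
-- inner 'for item, count in zip(want, number)' loop with its break
def solutionInner (pairs : List (String × Int)) (counter : PySem.Dict String Int) (days : Int) : Int :=
  match pairs with
  | [] => days
  | (item, count) :: rest =>
    if counter.getD item 0 ≠ count then days - 1
    else solutionInner rest counter days

-- body of 'for _ in range(check)': state (days, start, end)
def solutionStep (want : List String) (number : List Int) (discount : List String)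
    (st : Int × Int × Int) (_ : Int) : Int × Int × Int :=
  let days := st.1 + 1
  let counter := PySem.Dict.counter (PySem.List.slice discount (some st.2.1) (some st.2.2))
  (solutionInner (want.zip number) counter days, st.2.1 + 1, st.2.2 + 1)

def solution (want : List String) (number : List Int) (discount : List String) : Int :=
  let check : Int := (discount.length : Int) - 9
  let st := (PySem.List.pyRange 0 check 1).foldl (solutionStep want number discount) (0, 0, 10)
  st.1

-- ===== PORT B =====
-- 'all(cnt.get(it, 0) == c for it, c in pairs)'
def solutionAltOk (pairs : List (String × Int)) (cnt : PySem.Dict String Int) : Bool :=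
  pairs.all (fun p => cnt.getD p.1 0 == p.2)

-- body of 'for out, inc in zip(discount, discount[10:])': state (cnt, days)
def solutionAltStep (pairs : List (String × Int))
    (st : PySem.Dict String Int × Int) (p : String × String) : PySem.Dict String Int × Int :=
  let c1 := st.1.insert p.1 (st.1.getD p.1 0 - 1)
  let c2 := c1.insert p.2 (c1.getD p.2 0 + 1)
  (c2, if solutionAltOk pairs c2 then st.2 + 1 else st.2)

def solution_alt (want : List String) (number : List Int) (discount : List String) : Int :=
  if discount.length < 10 then 0
  else
    let pairs := want.zip number
    -- discount[:10] is 'take 10' (PySem.List.slice_to_natCast); discount[10:] is 'drop 10' (slice_from_natCast)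
    let cnt := (discount.take 10).foldl (fun d x => d.insert x (d.getD x 0 + 1)) PySem.Dict.empty
    let days : Int := if solutionAltOk pairs cnt then 1 else 0
    let st := (discount.zip (discount.drop 10)).foldl (solutionAltStep pairs) (cnt, days)
    st.2

-- ===== PRECONDITION & SPEC =====
def Spec_solution (want : List String) (number : List Int) (discount : List String) (out : Int) : Prop := out = solution_alt want number discount
instance (want : List String) (number : List Int) (discount : List String) (out : Int) : Decidable (Spec_solution want number discount out) := by unfold Spec_solution; infer_instance

-- ===== CLAIM (what is proved, stated in full; the proofs are below) =====
def Claim_equal_solution : Prop := ∀ (want : List String) (number : List Int) (discount : List String), Dom_solution want number discount → Spec_solution want number discount (solution want number discount)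

-- ===== LEMMAS AND PROOFS =====

-- is window w accepted? (each wanted item's multiplicity in w equals its required number)
def okWin (pairs : List (String × Int)) (w : List String) : Bool :=
  pairs.all (fun p => ((w.count p.1 : Int)) == p.2)

-- number of accepted windows among the first n windows of l (window i = (l.drop i).take 10)
def winCount (pairs : List (String × Int)) : Nat → List String → Int
  | 0, _ => 0
  | n + 1, l => (if okWin pairs (l.take 10) then 1 else 0) + winCount pairs n l.tail

theorem solutionInner_eq (pairs : List (String × Int)) (counter : PySem.Dict String Int) (days : Int) :
    solutionInner pairs counter days =
      if pairs.all (fun p => counter.getD p.1 0 == p.2) then days else days - 1 := by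
  induction pairs with
  | nil => simp [solutionInner]
  | cons p rest ih =>
    obtain ⟨item, count⟩ := p
    by_cases h : counter.getD item 0 = count
    · simp only [solutionInner, ih, List.all_cons, h, beq_self_eq_true, Bool.true_and]
      simp
    · simp [solutionInner, h]

theorem aloop (want : List String) (number : List Int) (discount : List String)
    (l : List Int) : ∀ (s : Nat) (days : Int),
    ((l.foldl (solutionStep want number discount) (days, (s : Int), (s : Int) + 10)).1)
    = days + winCount (want.zip number) l.length (discount.drop s) := by
  induction l with
  | nil => intro s days; simp [winCount]
  | cons a rest ih =>
    intro s days
    have hslice : PySem.List.slice discount (some (s : Int)) (some ((s : Int) + 10))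
        = (discount.drop s).take 10 := by
      rw [show ((s : Int) + 10) = (((s + 10 : Nat) : Int)) by push_cast; ring,
        PySem.List.slice_natCast]
      congr 1
      omega
    have hstep : solutionStep want number discount (days, (s : Int), (s : Int) + 10) a
        = ((if okWin (want.zip number) ((discount.drop s).take 10) then days + 1 else days + 1 - 1),
           ((s + 1 : Nat) : Int), ((s + 1 : Nat) : Int) + 10) := by
      simp only [solutionStep, hslice, solutionInner_eq, okWin, PySem.Dict.getD_counter]
      norm_num
      ring
    rw [List.foldl_cons, hstep, ih (s + 1), List.length_cons]
    simp only [winCount, List.tail_drop]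
    rw [show discount.drop (s + 1) = (discount.drop s).tail by rw [List.tail_drop]]
    split <;> ring

theorem solution_eq_winCount (want : List String) (number : List Int) (discount : List String) :
    solution want number discount =
      winCount (want.zip number) ((discount.length : Int) - 9).toNat discount := by
  unfold solution
  have := aloop want number discount (PySem.List.pyRange 0 ((discount.length : Int) - 9) 1) 0 0
  simp only [Nat.cast_zero, List.drop_zero, zero_add] at this ⊢
  rw [show ((0 : Int), (0 : Int), (10 : Int)) = ((0 : Int), ((0 : Nat) : Int), ((0 : Nat) : Int) + 10) by norm_num] at *
  rw [this, PySem.List.length_pyRange_one]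
  norm_num

theorem okD_eq (pairs : List (String × Int)) (cnt : PySem.Dict String Int) (w : List String)
    (h : ∀ x, cnt.getD x 0 = ((w.count x : Int))) :
    solutionAltOk pairs cnt = okWin pairs w := by
  unfold solutionAltOk okWin
  simp only [h]

theorem bloop (pairs : List (String × Int)) :
    ∀ (l : List String) (cnt : PySem.Dict String Int) (days : Int),
    (∀ x, cnt.getD x 0 = (((l.take 10).count x : Int))) →
    ((l.zip (l.drop 10)).foldl (solutionAltStep pairs) (cnt, days)).2
      = days + winCount pairs (l.length - 10) l.tail := by
  intro l
  induction l with
  | nil => intro cnt days _; simp [winCount]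
  | cons x t ih =>
    intro cnt days hinv
    by_cases hlen : t.length < 10
    · have hdrop : (x :: t).drop 10 = [] := by
        apply List.drop_eq_nil_of_le
        simp; omega
      rw [hdrop, List.zip_nil_right]
      simp only [List.foldl_nil]
      rw [show (x :: t).length - 10 = 0 by simp; omega]
      simp [winCount]
    · push_neg at hlen
      have h9 : 9 < t.length := by omega
      obtain ⟨y, hy9⟩ : ∃ y, t.drop 9 = y :: t.drop 10 := by
        refine ⟨t[9], ?_⟩
        rw [List.drop_eq_getElem_cons h9]
      have hdrop : (x :: t).drop 10 = y :: t.drop 10 := by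
        rw [List.drop_succ_cons, hy9]
      rw [hdrop, List.zip_cons_cons]
      have htake : t.take 10 = t.take 9 ++ [y] := by
        rw [show (10 : Nat) = 9 + 1 from rfl, List.take_add, hy9]
        rfl
      have hinv' : ∀ z, ((solutionAltStep pairs (cnt, days) (x, y)).1).getD z 0
          = (((t.take 10).count z : Int)) := by
        intro z
        have hx := hinv x
        have hy2 := hinv y
        have hz := hinv z
        simp only [solutionAltStep, PySem.Dict.getD_insert, htake]
        by_cases hzy : z = y <;> by_cases hzx : z = x <;> by_cases hyx : y = x <;>
          simp_all [List.count_append, List.count_cons, List.take_succ_cons] <;>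
          push_cast at * <;>
          first
            | omega
            | exact fun h => hyx h.symm
            | rw [if_neg (fun h => hzx h.symm), if_neg (fun h => hzy h.symm)]
      have hokstep : solutionAltOk pairs ((solutionAltStep pairs (cnt, days) (x, y)).1)
          = okWin pairs (t.take 10) := okD_eq _ _ _ hinv'
      have hstep : solutionAltStep pairs (cnt, days) (x, y)
          = ((solutionAltStep pairs (cnt, days) (x, y)).1,
             if okWin pairs (t.take 10) then days + 1 else days) := by
        conv_lhs => rw [show solutionAltStep pairs (cnt, days) (x, y)
          = ((solutionAltStep pairs (cnt, days) (x, y)).1,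
             (solutionAltStep pairs (cnt, days) (x, y)).2) from rfl]
        rw [show (solutionAltStep pairs (cnt, days) (x, y)).2
          = if solutionAltOk pairs ((solutionAltStep pairs (cnt, days) (x, y)).1) then days + 1 else days from rfl]
        rw [hokstep]
      rw [List.foldl_cons, hstep, ih _ _ hinv']
      rw [show (x :: t).length - 10 = (t.length - 10) + 1 by simp; omega]
      simp only [winCount, List.tail_cons]
      split <;> ring

theorem solution_alt_eq_winCount (want : List String) (number : List Int) (discount : List String) :
    solution_alt want number discount =
      winCount (want.zip number) ((discount.length : Int) - 9).toNat discount := by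
  unfold solution_alt
  by_cases h : discount.length < 10
  · rw [if_pos h]
    rw [show ((discount.length : Int) - 9).toNat = 0 by omega]
    simp [winCount]
  · rw [if_neg h]
    push_neg at h
    have hcnt : ∀ z, ((discount.take 10).foldl
        (fun d x => d.insert x (d.getD x 0 + 1)) PySem.Dict.empty).getD z 0
        = (((discount.take 10).count z : Int)) := by
      intro z
      rw [PySem.Dict.getD_foldl_insert_add_one]
      simp
    rw [bloop _ discount _ _ hcnt, okD_eq (want.zip number) _ (discount.take 10) hcnt]
    rw [show ((discount.length : Int) - 9).toNat = (discount.length - 10) + 1 by omega]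
    simp only [winCount]

-- ===== VERDICT (by name: the statement is the Claim_ definition above) =====
theorem solution_spec : Claim_equal_solution := by
  intro want number discount _
  unfold Spec_solution
  rw [solution_eq_winCount, solution_alt_eq_winCount]
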